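-- pv_equiv track=rewrite | github.com/Lexani/informatics-labs | T&VP/lab5/threshold_scheme.py | continuant
-- ===== SOURCE A (Python) =====
-- def continuant(seq, j = -1, continuant_list = {}):
-- 	if j < 0:
-- 		return continuant(seq, len(seq), {})
-- 	else:
-- 		if j == 0:
-- 			continuant_list[0] = 1
-- 		if j == 1:
-- 			continuant_list[1] = seq[0]
-- 		if not j in continuant_list:
-- 			continuant_list[j] = continuant(seq, j - 1, continuant_list) * seq[j - 1] + continuant(seq, j - 2, continuant_list)
--
-- 		return continuant_list[j]
-- ===== SOURCE B (Python) =====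
-- def continuant(seq, j=-1, continuant_list={}):
-- 	if j < 0:
-- 		j = len(seq)
-- 		continuant_list = {}
-- 	vals = []
-- 	for i in range(j + 1):
-- 		if i == 0:
-- 			v = 1
-- 		elif i == 1:
-- 			v = seq[0]
-- 		elif i in continuant_list:
-- 			v = continuant_list[i]
-- 		else:
-- 			v = vals[i - 1] * seq[i - 1] + vals[i - 2]
-- 		vals.append(v)
-- 	return vals[j]
-- ===== Notes on version B (the rewrite author's own statement) =====
-- stated objective: alternative
-- what changed: The memoized top-down recursion is replaced by a single bottom-up loop that fills a table of effective continuant values (1, seq[0], then dict value if cached else the recurrence), returning the j-th entry.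
-- outside the precondition, e.g. on continuant([], 2, {2: 5}): A returns 5, B raises IndexError; on continuant([5], 2, {2: 13}): A returns 13, B returns 13
import Mathlib
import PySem

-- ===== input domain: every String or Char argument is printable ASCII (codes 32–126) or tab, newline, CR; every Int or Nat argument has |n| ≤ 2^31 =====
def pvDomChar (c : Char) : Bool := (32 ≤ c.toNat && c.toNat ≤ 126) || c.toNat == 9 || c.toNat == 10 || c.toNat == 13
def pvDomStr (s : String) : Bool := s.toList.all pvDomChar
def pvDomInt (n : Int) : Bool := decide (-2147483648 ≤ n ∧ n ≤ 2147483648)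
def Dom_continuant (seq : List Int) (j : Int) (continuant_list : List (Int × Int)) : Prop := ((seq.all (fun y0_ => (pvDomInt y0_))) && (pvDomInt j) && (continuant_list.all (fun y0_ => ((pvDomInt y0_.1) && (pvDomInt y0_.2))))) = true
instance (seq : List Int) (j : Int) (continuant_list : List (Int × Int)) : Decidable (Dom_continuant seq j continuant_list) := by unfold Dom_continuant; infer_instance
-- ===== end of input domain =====

-- B replaces A's memoized top-down recursion by a single bottom-up loop over a table of effective
-- values (alternative decomposition, similar cost); equivalence is about the RETURN value only
-- (Python A mutates its dict argument in place, B does not).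


-- ===== PORT A =====
-- A's memoized recursion; the mutated dict is threaded as state.
-- seq[j-1]/seq[0] are ported with pyGet? + getD 0: exact wherever the index is in range (which Pre_ guarantees).
def contARec (seq : List Int) : Nat → PySem.Dict Int Int → Int × PySem.Dict Int Int
  | 0, d =>
      let d := d.insert 0 1
      (d.getD 0 0, d)
  | 1, d =>
      let d := d.insert 1 ((PySem.List.pyGet? seq 0).getD 0)
      (d.getD 1 0, d)
  | (k+2), d =>
      match d.get? ((k : Int) + 2) with
      | some v => (v, d)
      | none =>
          let r1 := contARec seq (k+1) d
          let r2 := contARec seq k r1.2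
          let d3 := r2.2.insert ((k : Int) + 2)
                      (r1.1 * (PySem.List.pyGet? seq ((k : Int) + 1)).getD 0 + r2.1)
          (d3.getD ((k : Int) + 2) 0, d3)

def continuant (seq : List Int) (j : Int) (continuant_list : List (Int × Int)) : Int :=
  if j < 0 then
    -- `return continuant(seq, len(seq), {})`
    (contARec seq seq.length PySem.Dict.empty).1
  else
    -- j ≥ 0 here, so j.toNat is exact
    (contARec seq j.toNat ⟨continuant_list⟩).1

-- ===== PORT B =====
-- one loop iteration of Source B: append the value for index i to the table `vals`
def contBStep (seq : List Int) (d : PySem.Dict Int Int) (vals : List Int) (i : Nat) : List Int :=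
  let v :=
    if i = 0 then 1
    else if i = 1 then (PySem.List.pyGet? seq 0).getD 0
    else
      match d.get? (i : Int) with
      | some w => w
      | none =>
          (PySem.List.pyGet? vals ((i : Int) - 1)).getD 0 *
            (PySem.List.pyGet? seq ((i : Int) - 1)).getD 0 +
            (PySem.List.pyGet? vals ((i : Int) - 2)).getD 0
  vals ++ [v]

def continuant_alt (seq : List Int) (j : Int) (continuant_list : List (Int × Int)) : Int :=
  let p := if j < 0 then ((seq.length : Int), ([] : List (Int × Int))) else (j, continuant_list)
  let d : PySem.Dict Int Int := ⟨p.2⟩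
  let vals := (List.range (p.1.toNat + 1)).foldl (contBStep seq d) []
  (PySem.List.pyGet? vals p.1).getD 0

-- ===== PRECONDITION & SPEC =====
-- Pre_ excludes j > len(seq): there the Python A raises IndexError, except when the caller-supplied
-- memo dict happens to short-circuit every out-of-range access (an accidental stale-cache value).
def Pre_continuant (seq : List Int) (j : Int) (continuant_list : List (Int × Int)) : Prop :=
  j < 0 ∨ j ≤ (seq.length : Int)
instance (seq : List Int) (j : Int) (continuant_list : List (Int × Int)) : Decidable (Pre_continuant seq j continuant_list) := by unfold Pre_continuant; infer_instance

def pvWitness_continuant : List Int × Int × (List (Int × Int)) := ([1, 2, 3, 4], 3, [(2, 99)])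

def Spec_continuant (seq : List Int) (j : Int) (continuant_list : List (Int × Int)) (out : Int) : Prop := out = continuant_alt seq j continuant_list
instance (seq : List Int) (j : Int) (continuant_list : List (Int × Int)) (out : Int) : Decidable (Spec_continuant seq j continuant_list out) := by unfold Spec_continuant; infer_instance

-- ===== CLAIM (what is proved, stated in full; the proofs are below) =====
def Claim_equal_continuant : Prop := ∀ (seq : List Int) (j : Int) (continuant_list : List (Int × Int)), Dom_continuant seq j continuant_list → Pre_continuant seq j continuant_list → Spec_continuant seq j continuant_list (continuant seq j continuant_list)

-- ===== LEMMAS AND PROOFS =====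

-- the "effective value" of index k: the dict value if cached (k ≥ 2), else the continuant recurrence;
-- indices 0 and 1 are always overwritten by both programs before being read, so the dict is ignored there
def eff (seq : List Int) (d : PySem.Dict Int Int) : Nat → Int
  | 0 => 1
  | 1 => (PySem.List.pyGet? seq 0).getD 0
  | (k+2) =>
      match d.get? ((k : Int) + 2) with
      | some v => v
      | none => eff seq d (k+1) * (PySem.List.pyGet? seq ((k : Int) + 1)).getD 0 + eff seq d k

-- invariant of A's threaded dict: at keys ≥ 2 it holds either the original entry or the effective value
def AInv (seq : List Int) (d0 d : PySem.Dict Int Int) : Prop :=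
  ∀ k : Nat, 2 ≤ k → d.get? (k : Int) = d0.get? (k : Int) ∨ d.get? (k : Int) = some (eff seq d0 k)

theorem contARec_eff (seq : List Int) (d0 : PySem.Dict Int Int) :
    ∀ (j : Nat) (d : PySem.Dict Int Int), AInv seq d0 d →
      (contARec seq j d).1 = eff seq d0 j ∧ AInv seq d0 (contARec seq j d).2 := by
  intro j
  induction j using Nat.strong_induction_on with
  | _ j ih =>
    match j with
    | 0 =>
      intro d hd
      refine ⟨by simp [contARec, eff, PySem.Dict.getD_insert_self], ?_⟩
      intro k hk
      simp only [contARec]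
      rw [PySem.Dict.get?_insert_of_ne _ _ (show (k:Int) ≠ 0 by omega)]
      exact hd k hk
    | 1 =>
      intro d hd
      refine ⟨by simp [contARec, eff, PySem.Dict.getD_insert_self], ?_⟩
      intro k hk
      simp only [contARec]
      rw [PySem.Dict.get?_insert_of_ne _ _ (show (k:Int) ≠ 1 by omega)]
      exact hd k hk
    | (k+2) =>
      intro d hd
      have hc : ((k+2 : Nat) : Int) = (k : Int) + 2 := by push_cast; ring
      cases hg : d.get? ((k : Int) + 2) with
      | some v =>
        have heff : eff seq d0 (k+2) = v := by
          rcases hd (k+2) (by omega) with h | h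
          · rw [hc] at h
            rw [eff, ← h, hg]
          · rw [hc, hg] at h
            exact (Option.some.inj h).symm
        constructor
        · simp [contARec, hg, heff]
        · intro m hm
          simpa [contARec, hg] using hd m hm
      | none =>
        have hd0 : d0.get? ((k : Int) + 2) = none := by
          rcases hd (k+2) (by omega) with h | h
          · rw [hc] at h; rw [← h, hg]
          · rw [hc, hg] at h; exact absurd h (by simp)
        obtain ⟨h1v, h1inv⟩ := ih (k+1) (by omega) d hd
        obtain ⟨h2v, h2inv⟩ := ih k (by omega) _ h1inv
        have heff : eff seq d0 (k+2)
            = (contARec seq (k+1) d).1 * (PySem.List.pyGet? seq ((k : Int) + 1)).getD 0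
              + (contARec seq k (contARec seq (k+1) d).2).1 := by
          rw [eff, hd0, h1v, h2v]
        constructor
        · simp [contARec, hg, PySem.Dict.getD_insert_self, heff]
        · intro m hm
          simp only [contARec, hg]
          by_cases hmk : (m : Int) = (k : Int) + 2
          · right
            have hm2 : m = k + 2 := by omega
            rw [hmk, PySem.Dict.get?_insert_self, hm2, heff]
          · rw [PySem.Dict.get?_insert_of_ne _ _ hmk]
            exact h2inv m hm

theorem foldl_contBStep (seq : List Int) (d : PySem.Dict Int Int) :
    ∀ m : Nat, (List.range m).foldl (contBStep seq d) [] = (List.range m).map (eff seq d) := by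
  intro m
  induction m with
  | zero => rfl
  | succ m ih =>
    rw [List.range_succ, List.foldl_append, List.map_append, ih]
    show contBStep seq d _ m = _
    match m with
    | 0 => rfl
    | 1 => rfl
    | (k+2) =>
      simp only [contBStep, List.map_cons, List.map_nil]
      have hc : ((k+2 : Nat) : Int) = (k : Int) + 2 := by push_cast; ring
      congr 1
      rw [if_neg (by omega), if_neg (by omega), hc]
      cases hg : d.get? ((k : Int) + 2) with
      | some w =>
        simp only [List.cons.injEq, and_true]
        rw [eff, hg]
      | none =>
        have h1 : (k : Int) + 2 - 1 = ((k+1 : Nat) : Int) := by push_cast; ring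
        have h2 : (k : Int) + 2 - 2 = ((k : Nat) : Int) := by omega
        simp only [List.cons.injEq, and_true, h1, h2, PySem.List.pyGet?_natCast]
        rw [List.getElem?_map, List.getElem?_map, List.getElem?_range (by omega), List.getElem?_range (by omega)]
        simp only [Option.map_some, Option.getD_some]
        have h3 : PySem.List.pyGet? seq ((k:Int) + 1) = seq[k+1]? := by
          rw [show ((k:Int)+1) = ((k+1:Nat):Int) from by push_cast; ring, PySem.List.pyGet?_natCast]
        rw [eff, hg, h3]

theorem alt_eq_eff (seq : List Int) (cl : List (Int × Int)) (i : Int) (hi : 0 ≤ i) :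
    continuant_alt seq i cl = eff seq ⟨cl⟩ i.toNat := by
  unfold continuant_alt
  simp only [if_neg (by omega : ¬ i < 0)]
  rw [foldl_contBStep]
  rw [show i = ((i.toNat : Nat) : Int) from by omega]
  rw [PySem.List.pyGet?_natCast, List.getElem?_map, List.getElem?_range (by omega)]
  simp only [Int.toNat_natCast, Option.map_some, Option.getD_some]

theorem glue (seq : List Int) (j : Int) (cl : List (Int × Int)) :
    continuant seq j cl = continuant_alt seq j cl := by
  unfold continuant
  by_cases hj : j < 0
  · rw [if_pos hj,
      (contARec_eff seq PySem.Dict.empty seq.length PySem.Dict.empty (fun k hk => Or.inl rfl)).1]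
    have h2 : continuant_alt seq (seq.length : Int) [] = eff seq ⟨[]⟩ (seq.length : Int).toNat :=
      alt_eq_eff seq [] (seq.length : Int) (by omega)
    unfold continuant_alt
    rw [if_pos hj]
    unfold continuant_alt at h2
    rw [if_neg (by omega : ¬ (seq.length : Int) < 0)] at h2
    exact h2.symm
  · rw [if_neg hj, alt_eq_eff seq cl j (by omega),
      (contARec_eff seq ⟨cl⟩ j.toNat ⟨cl⟩ (fun k hk => Or.inl rfl)).1]

-- ===== VERDICT (by name: the statement is the Claim_ definition above) =====
theorem continuant_spec : Claim_equal_continuant := by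
  intro seq j cl _ _
  unfold Spec_continuant
  exact glue seq j cl
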